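-- pv_equiv track=rewrite | github.com/HydeBlack/openai-api | openai-api.py | filter_lines_by_codes
-- ===== SOURCE A (Python) =====
-- def filter_lines_by_codes(text_data, charge_codes):
--     charge_codes = [code.strip() for code in charge_codes]
--     filtered_lines = {code: [] for code in charge_codes}
--
--     current_code = None
--     buffer_line = ""
--
--     for page in text_data:
--         for line in page.splitlines():
--             line = line.strip()
--             if not line:
--                 continue
--
--             for code in charge_codes:
--                 if line.startswith(code):
--                     if current_code and buffer_line:
--                         filtered_lines[current_code].append(buffer_line.strip())
--                     current_code = code
--                     buffer_line = line
--                     break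
--             else:
--                 if current_code:
--                     buffer_line += " " + line
--
--     if current_code and buffer_line:
--         filtered_lines[current_code].append(buffer_line.strip())
--
--     return filtered_lines
-- ===== SOURCE B (Python) =====
-- def filter_lines_by_codes(text_data, charge_codes):
--     codes = [code.strip() for code in charge_codes]
--     # hash index: each (distinct) code -> its first position in the list; longest code length
--     index = {}
--     for i, code in enumerate(codes):
--         index.setdefault(code, i)
--     maxlen = 0
--     for code in codes:
--         if len(code) > maxlen:
--             maxlen = len(code)
--     result = {code: [] for code in codes}
--
--     current = ""
--     parts = []
--     for page in text_data:
--         for raw in page.splitlines():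
--             line = raw.strip()
--             if not line:
--                 continue
--             # match the line against every prefix length at once via the hash index;
--             # the matching code of lowest list position wins (= first match in list order)
--             best = None
--             for k in range(min(maxlen, len(line)) + 1):
--                 i = index.get(line[:k])
--                 if i is not None and (best is None or i < best):
--                     best = i
--             if best is not None:
--                 if current and parts:
--                     result[current].append(" ".join(parts))
--                 current = codes[best]
--                 parts = [line]
--             elif current:
--                 parts.append(line)
--     if current and parts:
--         result[current].append(" ".join(parts))
--     return result
-- ===== Notes on version B (the rewrite author's own statement) =====
-- stated objective: faster
-- what changed: B replaces A's inner scan over all charge codes per line (each a startswith check) by a dict keyed by code built once, queried with each prefix of the line up to the longest code length and taking the minimum list position, and accumulates each buffered entry as a list of parts joined once instead of repeated string concatenation.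
import Mathlib
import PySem

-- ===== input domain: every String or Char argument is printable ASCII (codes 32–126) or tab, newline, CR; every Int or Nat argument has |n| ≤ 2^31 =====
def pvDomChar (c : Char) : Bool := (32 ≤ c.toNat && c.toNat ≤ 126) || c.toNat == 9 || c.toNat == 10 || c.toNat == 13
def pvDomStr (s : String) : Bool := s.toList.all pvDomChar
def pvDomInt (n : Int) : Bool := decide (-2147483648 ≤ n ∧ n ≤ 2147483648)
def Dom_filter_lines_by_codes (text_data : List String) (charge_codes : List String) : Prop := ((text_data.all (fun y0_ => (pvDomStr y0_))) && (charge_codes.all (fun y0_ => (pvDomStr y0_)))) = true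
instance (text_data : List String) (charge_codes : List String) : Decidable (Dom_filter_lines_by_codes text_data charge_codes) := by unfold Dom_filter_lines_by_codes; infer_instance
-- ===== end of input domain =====

-- B replaces A's per-line scan over all codes by a hash index over the codes queried
-- once per prefix length of the line (lowest list position wins), and builds each
-- buffered entry as a list of parts joined once instead of repeated string concatenation.


-- ===== PORT A =====
-- A's state: (filtered_lines, current_code : Option, buffer_line : String)
-- flush: `if current_code and buffer_line: filtered_lines[current_code].append(buffer_line.strip())`
def pvFlushA (d : PySem.Dict String (List String)) (cur : Option String) (buf : String) :
    PySem.Dict String (List String) :=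
  match cur with
  | some c => if c ≠ "" ∧ buf ≠ "" then d.modify c [] (· ++ [PySem.Str.strip buf]) else d
  | none => d

-- A's inner loop body (one line of one page); the for/break/else over codes is the first match
def pvStepA (codes : List String)
    (st : PySem.Dict String (List String) × Option String × String) (raw : String) :
    PySem.Dict String (List String) × Option String × String :=
  let line := PySem.Str.strip raw
  if line = "" then st
  else
    match codes.find? (fun code => PySem.Str.startswith line code) with
    | some code => (pvFlushA st.1 st.2.1 st.2.2, some code, line)
    | none =>
      match st.2.1 with
      | some c => if c ≠ "" then (st.1, st.2.1, st.2.2 ++ " " ++ line) else st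
      | none => st

def filter_lines_by_codes (text_data : List String) (charge_codes : List String) :
    List (String × List String) :=
  let codes := charge_codes.map PySem.Str.strip
  let st := text_data.foldl
    (fun st page => (PySem.Str.splitlines page).foldl (pvStepA codes) st)
    (codes.foldl (fun d code => d.insert code []) PySem.Dict.empty, (none : Option String), "")
  (pvFlushA st.1 st.2.1 st.2.2).items

-- ===== PORT B =====
-- index.setdefault(code, i) over enumerate(codes): code -> first list position
def pvIndexB (codes : List String) : PySem.Dict String Int :=
  (PySem.List.enumerate codes).foldl (fun d ic => d.setdefault ic.2 ic.1) PySem.Dict.empty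

-- maxlen = longest code length
def pvMaxlenB (codes : List String) : Int :=
  codes.foldl (fun m code => if PySem.Str.len code > m then PySem.Str.len code else m) 0

-- best = min over k of index.get(line[:k])
def pvBestB (index : PySem.Dict String Int) (maxlen : Int) (line : String) : Option Int :=
  (PySem.List.pyRange 0 (min maxlen (PySem.Str.len line) + 1) 1).foldl
    (fun best k =>
      match index.get? (PySem.Str.slice line none (some k)) with
      | none => best
      | some i =>
        match best with
        | none => some i
        | some b => if i < b then some i else some b) none

-- flush: `if current and parts: result[current].append(" ".join(parts))`
def pvFlushB (d : PySem.Dict String (List String)) (cur : String) (parts : List String) :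
    PySem.Dict String (List String) :=
  if cur ≠ "" ∧ parts ≠ [] then d.modify cur [] (· ++ [PySem.Str.join " " parts]) else d

def pvStepB (codes : List String) (index : PySem.Dict String Int) (maxlen : Int)
    (st : PySem.Dict String (List String) × String × List String) (raw : String) :
    PySem.Dict String (List String) × String × List String :=
  let line := PySem.Str.strip raw
  if line = "" then st
  else
    match pvBestB index maxlen line with
    | some bi => (pvFlushB st.1 st.2.1 st.2.2, PySem.List.pyGetD codes bi "", [line])
    | none => if st.2.1 ≠ "" then (st.1, st.2.1, st.2.2 ++ [line]) else st

def filter_lines_by_codes_alt (text_data : List String) (charge_codes : List String) :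
    List (String × List String) :=
  let codes := charge_codes.map PySem.Str.strip
  let index := pvIndexB codes
  let maxlen := pvMaxlenB codes
  let st := text_data.foldl
    (fun st page => (PySem.Str.splitlines page).foldl (pvStepB codes index maxlen) st)
    (codes.foldl (fun d code => d.insert code []) PySem.Dict.empty, ("" : String), ([] : List String))
  (pvFlushB st.1 st.2.1 st.2.2).items

-- ===== PRECONDITION & SPEC =====
def Spec_filter_lines_by_codes (text_data : List String) (charge_codes : List String) (out : List (String × List String)) : Prop := out = filter_lines_by_codes_alt text_data charge_codes
instance (text_data : List String) (charge_codes : List String) (out : List (String × List String)) : Decidable (Spec_filter_lines_by_codes text_data charge_codes out) := by unfold Spec_filter_lines_by_codes; infer_instance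

-- ===== CLAIM (what is proved, stated in full; the proofs are below) =====
def Claim_equal_filter_lines_by_codes : Prop := ∀ (text_data : List String) (charge_codes : List String), Dom_filter_lines_by_codes text_data charge_codes → Spec_filter_lines_by_codes text_data charge_codes (filter_lines_by_codes text_data charge_codes)

-- ===== LEMMAS AND PROOFS =====

-- a string that strips to itself and is nonempty: no leading/trailing whitespace
def pvClean (cs : List Char) : Prop :=
  cs ≠ [] ∧ (∀ c ∈ cs.head?, PySem.Chars.isspace c = false) ∧
    (∀ c ∈ cs.getLast?, PySem.Chars.isspace c = false)

theorem pv_strip_of_clean (cs : List Char) (h : pvClean cs) : PySem.Chars.strip cs = cs := by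
  obtain ⟨hne, hh, hl⟩ := h
  have hls : PySem.Chars.lstrip cs = cs := by
    cases cs with
    | nil => rfl
    | cons c t =>
      have : PySem.Chars.isspace c = false := hh c rfl
      simp [PySem.Chars.lstrip, this]
  have hrev : cs.reverse ≠ [] := by simpa using hne
  have hrs : PySem.Chars.rstrip cs = cs := by
    cases hr : cs.reverse with
    | nil => exact absurd hr hrev
    | cons c t =>
      have hlast : cs.getLast? = some c := by
        rw [← List.head?_reverse, hr]; rfl
      have : PySem.Chars.isspace c = false := hl c hlast
      have : List.dropWhile PySem.Chars.isspace cs.reverse = cs.reverse := by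
        rw [hr, List.dropWhile_cons_of_neg (by simp [this])]
      simp [PySem.Chars.rstrip, this]
  simp [PySem.Chars.strip, hls, hrs]

theorem pv_head?_eq_of_prefix {l₁ l₂ : List Char} (h : l₁ <+: l₂) (hne : l₁ ≠ []) :
    l₂.head? = l₁.head? := by
  obtain ⟨t, rfl⟩ := h
  cases l₁ with
  | nil => exact absurd rfl hne
  | cons a l => rfl

theorem pv_clean_strip (cs : List Char) (h : PySem.Chars.strip cs ≠ []) :
    pvClean (PySem.Chars.strip cs) := by
  refine ⟨h, ?_, ?_⟩
  · -- head of strip cs = head of lstrip cs, which is non-space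
    have hpre : PySem.Chars.strip cs <+: PySem.Chars.lstrip cs := by
      have hsf : List.dropWhile PySem.Chars.isspace (PySem.Chars.lstrip cs).reverse
          <:+ (PySem.Chars.lstrip cs).reverse := List.dropWhile_suffix _
      have := List.reverse_prefix.mpr hsf
      simpa [PySem.Chars.strip, PySem.Chars.rstrip] using this
    intro c hc
    have hh : (PySem.Chars.lstrip cs).head? = some c := by
      rw [pv_head?_eq_of_prefix hpre h]; exact hc
    have : ∀ x ∈ (List.dropWhile PySem.Chars.isspace cs).head?, PySem.Chars.isspace x = false := by
      intro x hx
      have := List.head?_dropWhile_not PySem.Chars.isspace cs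
      cases hdw : (List.dropWhile PySem.Chars.isspace cs).head? with
      | none => simp [hdw] at hx
      | some y => rw [hdw] at hx this; simp at hx this; simpa [← hx] using this
    exact this c (by simpa [PySem.Chars.lstrip] using hh)
  · intro c hc
    have hgl : (List.dropWhile PySem.Chars.isspace (PySem.Chars.lstrip cs).reverse).head? = some c := by
      have : (PySem.Chars.strip cs).getLast? = some c := hc
      simpa [PySem.Chars.strip, PySem.Chars.rstrip, ← List.head?_reverse] using this
    have := List.head?_dropWhile_not PySem.Chars.isspace (PySem.Chars.lstrip cs).reverse
    rw [hgl] at this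
    simpa using this

theorem pv_intercalate_cons_cons (sep a b : List Char) (l : List (List Char)) :
    List.intercalate sep (a :: b :: l) = a ++ sep ++ List.intercalate sep (b :: l) := by
  simp [List.intercalate, List.intersperse]

theorem pv_join_concat (ps : List (List Char)) (x : List Char) (h : ps ≠ []) :
    PySem.Chars.join [' '] (ps ++ [x]) = PySem.Chars.join [' '] ps ++ ' ' :: x := by
  induction ps with
  | nil => exact absurd rfl h
  | cons p ps ih =>
    cases ps with
    | nil => simp [PySem.Chars.join, List.intercalate]
    | cons q qs =>
      have := ih (by simp)
      simp only [PySem.Chars.join, List.cons_append] at this ⊢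
      rw [pv_intercalate_cons_cons [' '] p q (qs ++ [x]),
        pv_intercalate_cons_cons [' '] p q qs, this]
      simp

theorem pv_clean_join (ps : List (List Char)) (h : ps ≠ []) (hc : ∀ p ∈ ps, pvClean p) :
    pvClean (PySem.Chars.join [' '] ps) := by
  induction ps with
  | nil => exact absurd rfl h
  | cons p ps ih =>
    cases ps with
    | nil =>
      simpa [PySem.Chars.join, List.intercalate] using hc p (by simp)
    | cons q qs =>
      have hp : pvClean p := hc p (by simp)
      have hrest : pvClean (PySem.Chars.join [' '] (q :: qs)) :=
        ih (by simp) (fun r hr => hc r (by simp [hr]))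
      rw [PySem.Chars.join, pv_intercalate_cons_cons]
      obtain ⟨hpne, hph, hpl⟩ := hp
      obtain ⟨hrne, hrh, hrl⟩ := hrest
      refine ⟨by simp [hpne], ?_, ?_⟩
      · intro c hch
        rw [List.append_assoc, List.head?_append_of_ne_nil _ hpne] at hch
        exact hph c hch
      · intro c hcl
        rw [List.append_assoc, List.getLast?_append, List.getLast?_append] at hcl
        cases hgl : (PySem.Chars.join [' '] (q :: qs)).getLast? with
        | none => exact absurd (List.getLast?_eq_none_iff.mp hgl) hrne
        | some y =>
          have hy := hrl y hgl
          simp only [PySem.Chars.join] at hgl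
          rw [hgl] at hcl
          simp at hcl
          subst hcl
          exact hy

theorem pv_index_aux (codes : List String) (start : Int) (d : PySem.Dict String Int) (p : String) :
    ((PySem.List.enumerate codes start).foldl (fun d ic => d.setdefault ic.2 ic.1) d).get? p
      = (d.get? p).or ((List.idxOf? p codes).map (fun n => start + (n : Int))) := by
  induction codes generalizing d start with
  | nil => simp [PySem.List.enumerate, List.idxOf?]
  | cons c rest ih =>
    have he : PySem.List.enumerate (c :: rest) start = (start, c) :: PySem.List.enumerate rest (start + 1) := rfl
    rw [he, List.foldl_cons, ih]
    by_cases hpc : p = c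
    · subst hpc
      rw [PySem.Dict.get?_setdefault_self]
      have : List.idxOf? p (p :: rest) = some 0 := by
        simp [List.idxOf?, List.findIdx?_cons]
      rw [this]
      cases hdp : d.get? p with
      | none => simp
      | some v => simp
    · rw [PySem.Dict.get?_setdefault_of_ne d start hpc]
      have : List.idxOf? p (c :: rest) = (List.idxOf? p rest).map (fun i => i + 1) := by
        simp [List.idxOf?, List.findIdx?_cons, Ne.symm hpc]
      rw [this]
      cases List.idxOf? p rest with
      | none => simp
      | some n =>
        cases d.get? p with
        | none => simp; ring
        | some v => simp

-- the index dict looks up the FIRST list position of a code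
theorem pv_index_get (codes : List String) (p : String) :
    (pvIndexB codes).get? p = (List.idxOf? p codes).map (fun n => (n : Int)) := by
  rw [pvIndexB, pv_index_aux]
  rw [PySem.Dict.get?_empty]
  cases List.idxOf? p codes with
  | none => simp
  | some n => simp

theorem pv_foldl_max_mono (rest : List String) (a b : Int) (hab : a ≤ b) :
    a ≤ rest.foldl (fun m code => if PySem.Str.len code > m then PySem.Str.len code else m) b := by
  induction rest generalizing b with
  | nil => simpa using hab
  | cons y t iht =>
    simp only [List.foldl_cons]
    apply iht
    split <;> omega

theorem pv_le_maxlen_aux (codes : List String) (m : Int) (c : String) (hc : c ∈ codes) :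
    PySem.Str.len c ≤ codes.foldl (fun m code => if PySem.Str.len code > m then PySem.Str.len code else m) m := by
  induction codes generalizing m with
  | nil => simp at hc
  | cons x rest ih =>
    rcases List.mem_cons.mp hc with h | h
    · subst h
      simp only [List.foldl_cons]
      apply pv_foldl_max_mono
      split <;> omega
    · exact ih _ h

theorem pv_le_maxlen (codes : List String) (c : String) (hc : c ∈ codes) :
    PySem.Str.len c ≤ pvMaxlenB codes :=
  pv_le_maxlen_aux codes 0 c hc

theorem pv_foldl_lookup (l : List Int) (g : Int → Option Int) (b : Option Int) :
    l.foldl (fun best k =>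
      match g k with
      | none => best
      | some i =>
        match best with
        | none => some i
        | some b0 => if i < b0 then some i else some b0) b
    = (l.filterMap g).foldl (fun best i =>
        match best with
        | none => some i
        | some b0 => if i < b0 then some i else some b0) b := by
  induction l generalizing b with
  | nil => rfl
  | cons k l ih =>
    rw [List.foldl_cons, List.filterMap_cons]
    cases hk : g k with
    | none => simp [ih]
    | some i => simp [ih]

theorem pv_foldl_min_some (vs : List Int) (m : Int) :
    vs.foldl (fun best i =>
        match best with
        | none => some i
        | some b0 => if i < b0 then some i else some b0) (some m)
      = some (vs.foldl min m) := by
  induction vs generalizing m with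
  | nil => rfl
  | cons v vs ih =>
    rw [List.foldl_cons, List.foldl_cons]
    change List.foldl _ (if v < m then some v else some m) vs = _
    have h2 : (if v < m then some v else some m) = some (min m v) := by
      split_ifs with h
      · congr 1; omega
      · congr 1; omega
    rw [h2, ih]

theorem pv_foldl_min_none (vs : List Int) :
    vs.foldl (fun best i =>
        match best with
        | none => some i
        | some b0 => if i < b0 then some i else some b0) none
      = vs.min? := by
  cases vs with
  | nil => rfl
  | cons v vs => rw [List.foldl_cons, List.min?_cons']; exact pv_foldl_min_some vs v

-- the prefix-length minimum equals the first matching list position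
theorem pv_best_eq (codes : List String) (line : String) :
    pvBestB (pvIndexB codes) (pvMaxlenB codes) line
      = (List.findIdx? (fun c => PySem.Str.startswith line c) codes).map (fun n => (n : Int)) := by
  rw [pvBestB, pv_foldl_lookup, pv_foldl_min_none]
  -- members of the looked-up value list are exactly first positions of codes that are prefixes
  have hmem : ∀ v : Int,
      v ∈ (PySem.List.pyRange 0 (min (pvMaxlenB codes) (PySem.Str.len line) + 1) 1).filterMap
            (fun k => (pvIndexB codes).get? (PySem.Str.slice line none (some k))) →
      ∃ (n : Nat) (hn : n < codes.length), v = (n : Int) ∧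
        PySem.Str.startswith line (codes[n]'hn) = true := by
    intro v hv
    obtain ⟨k, hk, hg⟩ := List.mem_filterMap.mp hv
    have hk01 := PySem.List.mem_pyRange_one.mp hk
    rw [pv_index_get] at hg
    obtain ⟨n, hidx, rfl⟩ : ∃ n, List.idxOf? (PySem.Str.slice line none (some k)) codes = some n ∧ v = (n : Int) := by
      cases h : List.idxOf? (PySem.Str.slice line none (some k)) codes with
      | none => rw [h] at hg; simp at hg
      | some n => rw [h] at hg; simp at hg; exact ⟨n, rfl, hg.symm⟩
    rw [List.idxOf?] at hidx
    obtain ⟨hn, hgn, hprev⟩ := List.findIdx?_eq_some_iff_getElem.mp hidx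
    have hcn : codes[n] = PySem.Str.slice line none (some k) := by simpa using hgn
    have hpre : codes[n].toList <+: line.toList := by
      rw [hcn]
      have : (PySem.Str.slice line none (some k)).toList = line.toList.take k.toNat := by
        simp [PySem.Str.slice, PySem.List.slice_to _ hk01.1]
      rw [this]
      exact List.take_prefix _ _
    exact ⟨n, hn, rfl, (PySem.Chars.startswith_iff _ _).mpr hpre⟩
  cases hfi : List.findIdx? (fun c => PySem.Str.startswith line c) codes with
  | none =>
    have hnone := List.findIdx?_eq_none_iff.mp hfi
    show _ = (none : Option Int)
    rw [List.min?_eq_none_iff]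
    by_contra hne
    obtain ⟨v, hv⟩ := List.exists_mem_of_ne_nil _ hne
    obtain ⟨n, hn, _, hsw⟩ := hmem v hv
    have := hnone codes[n] (List.getElem_mem hn)
    rw [PySem.Str.startswith] at hsw this
    rw [hsw] at this
    simp at this
  | some n =>
    obtain ⟨hn, hpn, hprev⟩ := List.findIdx?_eq_some_iff_getElem.mp hfi
    show _ = some ((n : Nat) : Int)
    have hswn : codes[n].toList <+: line.toList := (PySem.Chars.startswith_iff _ _).mp (by simpa using hpn)
    rw [List.min?_eq_some_iff]
    constructor
    · -- (n : Int) is among the values: take k = len codes[n]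
      apply List.mem_filterMap.mpr
      refine ⟨(codes[n].toList.length : Int), ?_, ?_⟩
      · apply PySem.List.mem_pyRange_one.mpr
        constructor
        · positivity
        · have h1 : PySem.Str.len codes[n] ≤ pvMaxlenB codes := pv_le_maxlen codes _ (List.getElem_mem hn)
          have h2 : codes[n].toList.length ≤ line.toList.length := hswn.length_le
          simp only [PySem.Str.len] at h1 ⊢
          omega
      · rw [pv_index_get]
        have hsl : PySem.Str.slice line none (some (codes[n].toList.length : Int)) = codes[n] := by
          apply String.toList_inj.mp
          simp [PySem.Str.slice]
          exact (List.prefix_iff_eq_take.mp hswn).symm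
        rw [hsl]
        have : List.idxOf? codes[n] codes = some n := by
          rw [List.idxOf?]
          apply List.findIdx?_eq_some_iff_getElem.mpr
          refine ⟨hn, by simp, ?_⟩
          intro j hj
          have hjt := hprev j hj
          by_contra hne2
          have hjeq : codes[j]'(by omega) = codes[n] := by simpa using hne2
          apply hjt
          show PySem.Str.startswith line (codes[j]'(by omega)) = true
          rw [hjeq, PySem.Str.startswith]
          exact (PySem.Chars.startswith_iff _ _).mpr hswn
        rw [this]
        simp
    · intro v hv
      obtain ⟨m, hm, rfl, hswm⟩ := hmem v hv
      have : n ≤ m := by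
        by_contra hlt
        exact hprev m (by omega) hswm
      exact_mod_cast this

-- the per-line state relation between the two ports
def pvRel (sa : PySem.Dict String (List String) × Option String × String)
    (sb : PySem.Dict String (List String) × String × List String) : Prop :=
  sa.1 = sb.1 ∧ sb.2.1 = sa.2.1.getD "" ∧
    sa.2.2.toList = PySem.Chars.join [' '] (sb.2.2.map String.toList) ∧
    (∀ p ∈ sb.2.2, pvClean p.toList) ∧ (sb.2.1 ≠ "" → sb.2.2 ≠ [])

-- the buffered string of A is exactly " ".join of B's parts, and empties coincide
theorem pv_parts_clean {sa : PySem.Dict String (List String) × Option String × String}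
    {sb : PySem.Dict String (List String) × String × List String} (h : pvRel sa sb)
    (hne : sb.2.2 ≠ []) :
    (sb.2.2.map String.toList) ≠ [] ∧ ∀ q ∈ sb.2.2.map String.toList, pvClean q := by
  refine ⟨by simpa using hne, ?_⟩
  intro q hq
  obtain ⟨p, hp, rfl⟩ := List.mem_map.mp hq
  exact h.2.2.2.1 p hp

theorem pv_buf_eq_empty {sa : PySem.Dict String (List String) × Option String × String}
    {sb : PySem.Dict String (List String) × String × List String} (h : pvRel sa sb) :
    (sa.2.2 = "" ↔ sb.2.2 = []) := by
  constructor
  · intro hb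
    by_contra hpb
    obtain ⟨hmne, hmc⟩ := pv_parts_clean h hpb
    have hclean := pv_clean_join _ hmne hmc
    have : sa.2.2.toList = [] := by rw [hb]; rfl
    rw [h.2.2.1] at this
    exact hclean.1 this
  · intro hb
    have : sa.2.2.toList = [] := by
      rw [h.2.2.1, hb]
      rfl
    exact String.toList_inj.mp this

theorem pv_strip_buf {sa : PySem.Dict String (List String) × Option String × String}
    {sb : PySem.Dict String (List String) × String × List String} (h : pvRel sa sb)
    (hne : sb.2.2 ≠ []) :
    PySem.Str.strip sa.2.2 = PySem.Str.join " " sb.2.2 := by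
  obtain ⟨hmne, hmc⟩ := pv_parts_clean h hne
  apply String.toList_inj.mp
  have h1 : (PySem.Str.strip sa.2.2).toList = PySem.Chars.strip sa.2.2.toList := by
    simp [PySem.Str.strip]
  have h2 : (PySem.Str.join " " sb.2.2).toList = PySem.Chars.join [' '] (sb.2.2.map String.toList) := by
    simp [PySem.Str.join]
  rw [h1, h2, h.2.2.1, pv_strip_of_clean _ (pv_clean_join _ hmne hmc)]

theorem pv_flush_rel (sa : PySem.Dict String (List String) × Option String × String)
    (sb : PySem.Dict String (List String) × String × List String) (h : pvRel sa sb) :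
    pvFlushA sa.1 sa.2.1 sa.2.2 = pvFlushB sb.1 sb.2.1 sb.2.2 := by
  obtain ⟨hd, hcur, hbuf, hclean, hinv⟩ := h
  cases ha : sa.2.1 with
  | none =>
    have hb : sb.2.1 = "" := by rw [hcur, ha]; rfl
    simp only [pvFlushA, pvFlushB, hb]
    rw [if_neg (by simp), hd]
  | some c =>
    have hb : sb.2.1 = c := by rw [hcur, ha]; rfl
    simp only [pvFlushA, pvFlushB, hb]
    by_cases hc : c = ""
    · rw [if_neg (by simp [hc]), if_neg (by simp [hc]), hd]
    · by_cases hp : sb.2.2 = []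
      · have hbe : sa.2.2 = "" := (pv_buf_eq_empty ⟨hd, hcur, hbuf, hclean, hinv⟩).mpr hp
        rw [if_neg (by simp [hbe]), if_neg (by simp [hp]), hd]
      · have hbe : sa.2.2 ≠ "" := fun hx => hp ((pv_buf_eq_empty ⟨hd, hcur, hbuf, hclean, hinv⟩).mp hx)
        rw [if_pos ⟨hc, hbe⟩, if_pos ⟨hc, hp⟩, hd,
          pv_strip_buf ⟨hd, hcur, hbuf, hclean, hinv⟩ hp]

theorem pv_step_rel (codes : List String)
    (sa : PySem.Dict String (List String) × Option String × String)
    (sb : PySem.Dict String (List String) × String × List String)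
    (raw : String) (h : pvRel sa sb) :
    pvRel (pvStepA codes sa raw) (pvStepB codes (pvIndexB codes) (pvMaxlenB codes) sb raw) := by
  obtain ⟨hd, hcur, hbuf, hclean, hinv⟩ := h
  simp only [pvStepA, pvStepB, pv_best_eq]
  by_cases hl : PySem.Str.strip raw = ""
  · rw [if_pos hl, if_pos hl]
    exact ⟨hd, hcur, hbuf, hclean, hinv⟩
  · rw [if_neg hl, if_neg hl]
    have hlc : pvClean (PySem.Str.strip raw).toList := by
      have ht : (PySem.Str.strip raw).toList = PySem.Chars.strip raw.toList := by
        simp [PySem.Str.strip]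
      rw [ht]
      apply pv_clean_strip
      rw [← ht]
      simpa using fun hx => hl (String.toList_inj.mp (by simpa using hx))
    cases hfi : List.findIdx? (fun c => PySem.Str.startswith (PySem.Str.strip raw) c) codes with
    | none =>
      have hfind : codes.find? (fun c => PySem.Str.startswith (PySem.Str.strip raw) c) = none := by
        rw [List.find?_eq_none]
        intro x hx
        have hxf := List.findIdx?_eq_none_iff.mp hfi x hx
        simpa [PySem.Str.startswith, PySem.Str.strip] using hxf
      rw [hfind]
      cases ha : sa.2.1 with
      | none =>
        have hb : sb.2.1 = "" := by rw [hcur, ha]; rfl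
        rw [hb, if_neg (show ¬("" ≠ "") by simp)]
        show pvRel sa sb
        exact ⟨hd, hcur, hbuf, hclean, hinv⟩
      | some c =>
        have hb : sb.2.1 = c := by rw [hcur, ha]; rfl
        by_cases hc : c = ""
        · rw [hb, if_neg (show ¬(c ≠ "") by simp [hc])]
          show pvRel (if c ≠ "" then (sa.1, some c, sa.2.2 ++ " " ++ PySem.Str.strip raw) else sa) sb
          rw [if_neg (show ¬(c ≠ "") by simp [hc])]
          exact ⟨hd, hcur, hbuf, hclean, hinv⟩
        · rw [hb, if_pos hc]
          show pvRel (if c ≠ "" then (sa.1, some c, sa.2.2 ++ " " ++ PySem.Str.strip raw) else sa)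
            (sb.1, c, sb.2.2 ++ [PySem.Str.strip raw])
          rw [if_pos hc]
          have hpne : sb.2.2 ≠ [] := hinv (by rw [hb]; exact hc)
          refine ⟨hd, by simp, ?_, ?_, ?_⟩
          · show (sa.2.2 ++ " " ++ PySem.Str.strip raw).toList
              = PySem.Chars.join [' '] ((sb.2.2 ++ [PySem.Str.strip raw]).map String.toList)
            rw [List.map_append]
            have hmne : sb.2.2.map String.toList ≠ [] := by simpa using hpne
            rw [List.map_singleton, pv_join_concat _ _ hmne, ← hbuf]
            simp
          · intro p hp
            rcases List.mem_append.mp hp with hp | hp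
            · exact hclean p hp
            · rw [List.mem_singleton.mp hp]
              exact hlc
          · intro _
            simp
    | some n =>
      obtain ⟨hn, hpn, hprev⟩ := List.findIdx?_eq_some_iff_getElem.mp hfi
      have hfind : codes.find? (fun c => PySem.Str.startswith (PySem.Str.strip raw) c)
          = some codes[n] := by
        apply List.find?_eq_some_iff_getElem.mpr
        exact ⟨hpn, n, hn, rfl, fun j hj => by simpa using hprev j hj⟩
      rw [hfind]
      refine ⟨?_, ?_, ?_, ?_, ?_⟩
      · exact pv_flush_rel sa sb ⟨hd, hcur, hbuf, hclean, hinv⟩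
      · show PySem.List.pyGetD codes ((n : Nat) : Int) "" = (some codes[n]).getD ""
        rw [PySem.List.pyGetD_natCast]
        simp [List.getD_eq_getElem?_getD, List.getElem?_eq_getElem hn]
      · show (PySem.Str.strip raw).toList
          = PySem.Chars.join [' '] ([PySem.Str.strip raw].map String.toList)
        simp [PySem.Chars.join, List.intercalate]
      · intro p hp
        rw [List.mem_singleton.mp hp]
        exact hlc
      · intro _
        simp

theorem pv_fold_lines_rel (codes : List String) (lines : List String)
    (sa : PySem.Dict String (List String) × Option String × String)
    (sb : PySem.Dict String (List String) × String × List String) (h : pvRel sa sb) :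
    pvRel (lines.foldl (pvStepA codes) sa)
      (lines.foldl (pvStepB codes (pvIndexB codes) (pvMaxlenB codes)) sb) := by
  induction lines generalizing sa sb with
  | nil => exact h
  | cons raw rest ih =>
    rw [List.foldl_cons, List.foldl_cons]
    exact ih _ _ (pv_step_rel codes sa sb raw h)

theorem pv_fold_rel (codes : List String) (pages : List String)
    (sa : PySem.Dict String (List String) × Option String × String)
    (sb : PySem.Dict String (List String) × String × List String) (h : pvRel sa sb) :
    pvRel
      (pages.foldl (fun st page => (PySem.Str.splitlines page).foldl (pvStepA codes) st) sa)
      (pages.foldl (fun st page =>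
        (PySem.Str.splitlines page).foldl (pvStepB codes (pvIndexB codes) (pvMaxlenB codes)) st) sb) := by
  induction pages generalizing sa sb with
  | nil => exact h
  | cons page rest ih =>
    rw [List.foldl_cons, List.foldl_cons]
    exact ih _ _ (pv_fold_lines_rel codes _ sa sb h)

-- ===== VERDICT (by name: the statement is the Claim_ definition above) =====
theorem filter_lines_by_codes_spec : Claim_equal_filter_lines_by_codes := by
  intro text_data charge_codes _
  show filter_lines_by_codes text_data charge_codes = filter_lines_by_codes_alt text_data charge_codes
  rw [filter_lines_by_codes, filter_lines_by_codes_alt, pvIndexB, pvMaxlenB]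
  have h0 : pvRel
      ((charge_codes.map PySem.Str.strip).foldl (fun d code => d.insert code []) PySem.Dict.empty,
        (none : Option String), "")
      ((charge_codes.map PySem.Str.strip).foldl (fun d code => d.insert code []) PySem.Dict.empty,
        ("" : String), ([] : List String)) := by
    refine ⟨rfl, rfl, by simp [PySem.Chars.join, List.intercalate], by simp, by simp⟩
  have h1 := pv_fold_rel (charge_codes.map PySem.Str.strip) text_data _ _ h0
  rw [pvIndexB, pvMaxlenB] at h1
  exact congrArg PySem.Dict.items (pv_flush_rel _ _ h1)
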